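-- pv_equiv track=rewrite | github.com/avdosev/airship_simulation | transform_wind_data.py | UVlalo
-- ===== SOURCE A (Python) =====
-- def UVlalo(U_data, V_data):
--     lo_start, lo_end = 0, 360
--     la_start, la_end = 90, -91
--     lo = lo_start
--     la = la_start
--     for U, V in zip(U_data, V_data):
--         yield U, V, la, lo
--         lo += 1
--         if lo == lo_end:
--             lo = lo_start
--             la -= 1
--             if la == la_end:
--                 pass
-- ===== SOURCE B (Python) =====
-- def UVlalo(U_data, V_data):
--     for i, (U, V) in enumerate(zip(U_data, V_data)):
--         q, r = divmod(i, 360)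
--         yield U, V, 90 - q, r
-- ===== Notes on version B (the rewrite author's own statement) =====
-- stated objective: simpler
-- what changed: Replaces the stateful lo/la counters (with the dead la==la_end branch) by closed-form index arithmetic: each coordinate is computed directly from the enumerate index via divmod(i, 360).
import Mathlib
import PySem

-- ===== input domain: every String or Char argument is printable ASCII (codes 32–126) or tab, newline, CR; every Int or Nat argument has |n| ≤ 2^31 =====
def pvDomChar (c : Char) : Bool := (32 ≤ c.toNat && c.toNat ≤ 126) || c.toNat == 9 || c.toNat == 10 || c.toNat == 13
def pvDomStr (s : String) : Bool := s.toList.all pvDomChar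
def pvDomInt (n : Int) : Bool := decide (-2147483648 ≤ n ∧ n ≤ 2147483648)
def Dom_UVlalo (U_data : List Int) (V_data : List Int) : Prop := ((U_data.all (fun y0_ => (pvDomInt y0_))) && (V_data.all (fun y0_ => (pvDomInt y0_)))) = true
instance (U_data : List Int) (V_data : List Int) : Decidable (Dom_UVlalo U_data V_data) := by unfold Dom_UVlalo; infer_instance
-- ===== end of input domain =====

-- B computes each coordinate in closed form from the enumerate index (divmod i 360)
-- instead of A's stateful lo/la counters; objective: simpler. Both are a single pass.

-- ===== PORT A =====
-- state (la, lo) threaded through the loop exactly as A's counters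
def UVlaloGo : List (Int × Int) → Int → Int → List (Int × Int × Int × Int)
  | [], _, _ => []
  | (U, V) :: rest, la, lo =>
    (U, V, la, lo) ::
      (if lo + 1 = 360 then UVlaloGo rest (la - 1) 0
       else UVlaloGo rest la (lo + 1))

def UVlalo (U_data : List Int) (V_data : List Int) : List (Int × Int × Int × Int) :=
  UVlaloGo (U_data.zip V_data) 90 0

-- ===== PORT B =====
def UVlalo_alt (U_data : List Int) (V_data : List Int) : List (Int × Int × Int × Int) :=
  (PySem.List.enumerate (U_data.zip V_data)).map
    (fun p => (p.2.1, p.2.2, 90 - PySem.Int.floordiv p.1 360, PySem.Int.mod p.1 360))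

-- ===== PRECONDITION & SPEC =====
def Spec_UVlalo (U_data : List Int) (V_data : List Int) (out : List (Int × Int × Int × Int)) : Prop := out = UVlalo_alt U_data V_data
instance (U_data : List Int) (V_data : List Int) (out : List (Int × Int × Int × Int)) : Decidable (Spec_UVlalo U_data V_data out) := by unfold Spec_UVlalo; infer_instance

-- ===== CLAIM (what is proved, stated in full; the proofs are below) =====
def Claim_equal_UVlalo : Prop := ∀ (U_data : List Int) (V_data : List Int), Dom_UVlalo U_data V_data → Spec_UVlalo U_data V_data (UVlalo U_data V_data)

-- ===== LEMMAS AND PROOFS =====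

theorem UVlaloGo_eq (l : List (Int × Int)) : ∀ (i : Int), 0 ≤ i →
    UVlaloGo l (90 - PySem.Int.floordiv i 360) (PySem.Int.mod i 360) =
      (PySem.List.enumerate l i).map
        (fun p => (p.2.1, p.2.2, 90 - PySem.Int.floordiv p.1 360, PySem.Int.mod p.1 360)) := by
  induction l with
  | nil => intro i _; simp [UVlaloGo, PySem.List.enumerate]
  | cons hd tl ih =>
    intro i hi
    obtain ⟨U, V⟩ := hd
    rw [PySem.List.enumerate_cons]
    have h360 : (0:Int) < 360 := by norm_num
    simp only [UVlaloGo, List.map_cons]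
    rw [PySem.Int.floordiv_eq_ediv_of_pos h360, PySem.Int.mod_eq_emod_of_pos h360]
    refine congrArg _ ?_
    have ih' := ih (i + 1) (by omega)
    rw [PySem.Int.floordiv_eq_ediv_of_pos h360, PySem.Int.mod_eq_emod_of_pos h360] at ih'
    by_cases h : i % 360 + 1 = 360
    · rw [if_pos h]
      have h1 : (i + 1) / 360 = i / 360 + 1 := by omega
      have h2 : (i + 1) % 360 = 0 := by omega
      rw [h1, h2] at ih'
      rw [← ih']; ring_nf
    · rw [if_neg h]
      have h1 : (i + 1) / 360 = i / 360 := by omega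
      have h2 : (i + 1) % 360 = i % 360 + 1 := by omega
      rw [h1, h2] at ih'
      exact ih'

-- ===== VERDICT (by name: the statement is the Claim_ definition above) =====
theorem UVlalo_spec : Claim_equal_UVlalo := by
  intro U V _
  unfold Spec_UVlalo UVlalo UVlalo_alt
  have := UVlaloGo_eq (U.zip V) 0 (le_refl 0)
  simpa [PySem.Int.floordiv, PySem.Int.mod] using this
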